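-- pv_equiv track=rewrite | github.com/uandysmith/vue-collector | src/vue_collector/script.py | _has_import
-- ===== SOURCE A (Python) =====
-- def _js_advance(code: str, i: int) -> int:
--     """Advance past a JS string literal or comment starting at code[i].
--
--     Handles: string literals (', ", `), single-line comments (//), block comments (/* */).
--     For a lone '/' not followed by '/' or '*', returns i + 1.
--     Returns the new index positioned after the consumed token.
--     """
--     c = code[i]
--     n = len(code)
--     if c in ('"', "'", '`'):
--         quote = c
--         i += 1
--         while i < n:
--             if code[i] == '\\':
--                 i += 2
--                 continue
--             if code[i] == quote:
--                 return i + 1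
--             i += 1
--         return i
--     if i + 1 < n and code[i + 1] == '/':
--         # Single-line comment — stop at '\n' so caller can set at_stmt_start
--         while i < n and code[i] != '\n':
--             i += 1
--         return i
--     if i + 1 < n and code[i + 1] == '*':
--         i += 2
--         while i < n - 1:
--             if code[i] == '*' and code[i + 1] == '/':
--                 return i + 2
--             i += 1
--         return i
--     return i + 1
--
-- def _has_import(code: str) -> bool:
--     """Return True if code contains a top-level import statement.
--
--     Scans character by character, skipping string literals (', ", `) and comments
--     (// and /* */), so import keywords inside strings or comments are not flagged.
--     A match is only recognised at a statement boundary: start of code, after a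
--     newline, or after a semicolon (leading whitespace is ignored).
--     """
--     i = 0
--     n = len(code)
--     at_stmt_start = True
--     while i < n:
--         c = code[i]
--
--         if c in ('"', "'", '`'):
--             at_stmt_start = False
--             i = _js_advance(code, i)
--
--         elif c == '/' and i + 1 < n and code[i + 1] in ('/', '*'):
--             # Comment — at_stmt_start preserved; for '//' the '\n' is left for next iteration
--             i = _js_advance(code, i)
--
--         elif c in ('\n', ';'):
--             at_stmt_start = True
--             i += 1
--
--         elif c in (' ', '\t', '\r') and at_stmt_start:
--             i += 1
--
--         elif at_stmt_start and (code[i : i + 7] == 'import ' or code[i : i + 7] == 'import{'):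
--             return True
--
--         else:
--             at_stmt_start = False
--             i += 1
--
--     return False
-- ===== SOURCE B (Python) =====
-- def _has_import(code: str) -> bool:
--     """Single-pass state machine over {normal, string, line, block} states."""
--     n = len(code)
--     i = 0
--     state = 'normal'
--     quote = ''
--     esc = False
--     at_stmt_start = True
--     while i < n:
--         c = code[i]
--         if state == 'normal':
--             if c in ('"', "'", '`'):
--                 state, quote, esc = 'string', c, False
--                 at_stmt_start = False
--                 i += 1
--             elif c == '/' and i + 1 < n and code[i + 1] == '/':
--                 state = 'line'
--                 i += 2
--             elif c == '/' and i + 1 < n and code[i + 1] == '*':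
--                 state = 'block'
--                 i += 2
--             elif c in ('\n', ';'):
--                 at_stmt_start = True
--                 i += 1
--             elif c in (' ', '\t', '\r') and at_stmt_start:
--                 i += 1
--             elif at_stmt_start and code[i:i + 7] in ('import ', 'import{'):
--                 return True
--             else:
--                 at_stmt_start = False
--                 i += 1
--         elif state == 'string':
--             if esc:
--                 esc = False
--             elif c == '\\':
--                 esc = True
--             elif c == quote:
--                 state = 'normal'
--             i += 1
--         elif state == 'line':
--             if c == '\n':
--                 state = 'normal'
--                 at_stmt_start = True
--             i += 1
--         else:  # block comment
--             if c == '*' and i + 1 < n and code[i + 1] == '/':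
--                 state = 'normal'
--                 i += 2
--             else:
--                 i += 1
--     return False
-- ===== Notes on version B (the rewrite author's own statement) =====
-- stated objective: alternative
-- what changed: Replaced A's _js_advance helper (which consumes a whole string literal or comment with its own inner index loops) by a single self-contained scan driven by an explicit state variable over {normal, string(quote,escape), line-comment, block-comment}, dispatching one character per iteration.
import Mathlib
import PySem

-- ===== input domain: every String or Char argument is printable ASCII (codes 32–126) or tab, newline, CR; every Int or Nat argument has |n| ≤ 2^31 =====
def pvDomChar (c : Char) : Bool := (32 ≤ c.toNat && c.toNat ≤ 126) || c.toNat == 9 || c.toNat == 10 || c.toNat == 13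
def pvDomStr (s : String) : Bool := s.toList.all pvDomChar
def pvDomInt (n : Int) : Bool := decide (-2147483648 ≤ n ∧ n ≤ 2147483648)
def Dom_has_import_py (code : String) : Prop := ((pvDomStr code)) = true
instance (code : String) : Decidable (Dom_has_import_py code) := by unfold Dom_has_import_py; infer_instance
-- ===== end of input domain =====

-- B replaces A's _js_advance helper by a single flat four-state scanner loop; objective: alternative decomposition (same cost).

-- ===== PORT A =====
-- _js_advance's string loop: while i<n: '\\' → i+=2; quote → return i+1; else i+=1
def strScan (q : Char) : List Char → List Char
  | [] => []
  | x :: r =>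
    if x = '\\' then strScan q (r.drop 1)
    else if x = q then r
    else strScan q r
  termination_by l => l.length
  decreasing_by all_goals simp; try omega

-- _js_advance's single-line-comment loop: while i<n and code[i] != '\n': i+=1
def lineScan : List Char → List Char
  | [] => []
  | x :: r => if x = '\n' then x :: r else lineScan r

-- _js_advance's block-comment loop: while i<n-1: '*/' → return i+2; else i+=1; return i
def blockScan : List Char → List Char
  | a :: b :: r => if a = '*' ∧ b = '/' then r else blockScan (b :: r)
  | l => l

def jsAdvance : List Char → List Char
  | [] => []
  | c :: rest =>
    if c = '"' ∨ c = '\'' ∨ c = '`' then strScan c rest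
    else if rest.head? = some '/' then lineScan (c :: rest)
    else if rest.head? = some '*' then blockScan (rest.drop 1)
    else rest

theorem strScan_len (q : Char) (l : List Char) : (strScan q l).length ≤ l.length := by
  fun_induction strScan <;> simp_all <;> omega

theorem lineScan_len (l : List Char) : (lineScan l).length ≤ l.length := by
  fun_induction lineScan <;> simp_all <;> omega

theorem blockScan_len (l : List Char) : (blockScan l).length ≤ l.length := by
  fun_induction blockScan <;> simp_all <;> omega

theorem jsAdvance_len (c : Char) (rest : List Char) (h : c ≠ '\n') :
    (jsAdvance (c :: rest)).length ≤ rest.length := by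
  by_cases h1 : c = '"' ∨ c = '\'' ∨ c = '`'
  · simpa [jsAdvance, h1] using strScan_len c rest
  · by_cases h2 : rest.head? = some '/'
    · have : lineScan (c :: rest) = lineScan rest := by simp [lineScan, h]
      simpa [jsAdvance, h1, h2, this] using lineScan_len rest
    · by_cases h3 : rest.head? = some '*'
      · simp [jsAdvance, h1, h2, h3]
        exact le_trans (blockScan_len _) (by simp)
      · simp [jsAdvance, h1, h2, h3]

def hasImportLoopA : List Char → Bool → Bool
  | [], _ => false
  | c :: rest, at_start =>
    if c = '"' ∨ c = '\'' ∨ c = '`' then hasImportLoopA (jsAdvance (c :: rest)) false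
    else if c = '/' ∧ (rest.head? = some '/' ∨ rest.head? = some '*') then
      hasImportLoopA (jsAdvance (c :: rest)) at_start
    else if c = '\n' ∨ c = ';' then hasImportLoopA rest true
    else if (c = ' ' ∨ c = '\t' ∨ c = '\r') ∧ at_start then hasImportLoopA rest at_start
    else if at_start ∧ ((c :: rest).take 7 = "import ".toList ∨ (c :: rest).take 7 = "import{".toList) then true
    else hasImportLoopA rest false
  termination_by l => l.length
  decreasing_by
  · have : c ≠ '\n' := by rintro rfl; simp_all
    have := jsAdvance_len c rest this; simp; omega
  · have := jsAdvance_len c rest (by rintro rfl; simp_all)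
    simp; omega
  · simp
  · simp
  · simp

def has_import_py (code : String) : Bool := hasImportLoopA code.toList true

-- ===== PORT B =====
inductive JsState
  | normal
  | instr : Char → Bool → JsState   -- inside a string literal: quote char, escape flag
  | lineC
  | blockC
deriving DecidableEq, Repr

def hasImportLoopB : List Char → JsState → Bool → Bool
  | [], _, _ => false
  | c :: rest, JsState.normal, at_start =>
    if c = '"' ∨ c = '\'' ∨ c = '`' then hasImportLoopB rest (JsState.instr c false) false
    else if c = '/' ∧ rest.head? = some '/' then hasImportLoopB (rest.drop 1) JsState.lineC at_start
    else if c = '/' ∧ rest.head? = some '*' then hasImportLoopB (rest.drop 1) JsState.blockC at_start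
    else if c = '\n' ∨ c = ';' then hasImportLoopB rest JsState.normal true
    else if (c = ' ' ∨ c = '\t' ∨ c = '\r') ∧ at_start then hasImportLoopB rest JsState.normal at_start
    else if at_start ∧ ((c :: rest).take 7 = "import ".toList ∨ (c :: rest).take 7 = "import{".toList) then true
    else hasImportLoopB rest JsState.normal false
  | c :: rest, JsState.instr q esc, at_start =>
    if esc then hasImportLoopB rest (JsState.instr q false) at_start
    else if c = '\\' then hasImportLoopB rest (JsState.instr q true) at_start
    else if c = q then hasImportLoopB rest JsState.normal at_start
    else hasImportLoopB rest (JsState.instr q esc) at_start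
  | c :: rest, JsState.lineC, at_start =>
    if c = '\n' then hasImportLoopB rest JsState.normal true
    else hasImportLoopB rest JsState.lineC at_start
  | c :: rest, JsState.blockC, at_start =>
    if c = '*' ∧ rest.head? = some '/' then hasImportLoopB (rest.drop 1) JsState.normal at_start
    else hasImportLoopB rest JsState.blockC at_start
  termination_by l _ _ => l.length
  decreasing_by all_goals simp <;> omega

def has_import_py_alt (code : String) : Bool := hasImportLoopB code.toList JsState.normal true

-- ===== PRECONDITION & SPEC =====
def Spec_has_import_py (code : String) (out : Bool) : Prop := out = has_import_py_alt code
instance (code : String) (out : Bool) : Decidable (Spec_has_import_py code out) := by unfold Spec_has_import_py; infer_instance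

-- ===== CLAIM (what is proved, stated in full; the proofs are below) =====
def Claim_equal_has_import_py : Prop := ∀ (code : String), Dom_has_import_py code → Spec_has_import_py code (has_import_py code)

-- ===== LEMMAS AND PROOFS =====

-- one-step unfold equations for B (a WF definition: rw by name needs these)
theorem B_cons_normal (c : Char) (rest : List Char) (at_start : Bool) :
    hasImportLoopB (c :: rest) JsState.normal at_start =
      (if c = '"' ∨ c = '\'' ∨ c = '`' then hasImportLoopB rest (JsState.instr c false) false
      else if c = '/' ∧ rest.head? = some '/' then hasImportLoopB (rest.drop 1) JsState.lineC at_start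
      else if c = '/' ∧ rest.head? = some '*' then hasImportLoopB (rest.drop 1) JsState.blockC at_start
      else if c = '\n' ∨ c = ';' then hasImportLoopB rest JsState.normal true
      else if (c = ' ' ∨ c = '\t' ∨ c = '\r') ∧ at_start then hasImportLoopB rest JsState.normal at_start
      else if at_start ∧ ((c :: rest).take 7 = "import ".toList ∨ (c :: rest).take 7 = "import{".toList) then true
      else hasImportLoopB rest JsState.normal false) := by
  rw [hasImportLoopB.eq_def]

theorem B_cons_instr (c : Char) (rest : List Char) (q : Char) (esc : Bool) (at_start : Bool) :
    hasImportLoopB (c :: rest) (JsState.instr q esc) at_start =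
      (if esc then hasImportLoopB rest (JsState.instr q false) at_start
      else if c = '\\' then hasImportLoopB rest (JsState.instr q true) at_start
      else if c = q then hasImportLoopB rest JsState.normal at_start
      else hasImportLoopB rest (JsState.instr q esc) at_start) := by
  rw [hasImportLoopB.eq_def]

theorem B_cons_lineC (c : Char) (rest : List Char) (at_start : Bool) :
    hasImportLoopB (c :: rest) JsState.lineC at_start =
      (if c = '\n' then hasImportLoopB rest JsState.normal true
      else hasImportLoopB rest JsState.lineC at_start) := by
  rw [hasImportLoopB.eq_def]

theorem B_cons_blockC (c : Char) (rest : List Char) (at_start : Bool) :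
    hasImportLoopB (c :: rest) JsState.blockC at_start =
      (if c = '*' ∧ rest.head? = some '/' then hasImportLoopB (rest.drop 1) JsState.normal at_start
      else hasImportLoopB rest JsState.blockC at_start) := by
  rw [hasImportLoopB.eq_def]

-- B's string state resolves to A's strScan remainder.
theorem B_instr (l : List Char) (q : Char) (a : Bool) :
    hasImportLoopB l (JsState.instr q false) a = hasImportLoopB (strScan q l) JsState.normal a := by
  fun_induction strScan q l with
  | case1 => simp [hasImportLoopB]
  | case2 r ih =>
    cases r with
    | nil => simp [hasImportLoopB, strScan]
    | cons y r2 =>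
      rw [B_cons_instr]
      simp only [Bool.false_eq_true, if_false, if_pos rfl]
      rw [B_cons_instr]
      simpa using ih
  | case3 r hq =>
    rw [B_cons_instr]
    simp [hq]
  | case4 x r hx hq ih =>
    rw [B_cons_instr]
    simpa [hx, hq] using ih

-- B's line-comment state resolves to A's lineScan remainder.
theorem B_lineC (l : List Char) (a : Bool) :
    hasImportLoopB l JsState.lineC a = hasImportLoopB (lineScan l) JsState.normal a := by
  fun_induction lineScan l with
  | case1 => simp [hasImportLoopB]
  | case2 r =>
    rw [B_cons_lineC, B_cons_normal]
    simp
  | case3 x r hx ih =>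
    rw [B_cons_lineC]
    simpa [hx] using ih

theorem B_singleton (x : Char) (a : Bool) :
    hasImportLoopB [x] JsState.normal a = false := by
  rw [B_cons_normal]
  split_ifs <;> simp_all [hasImportLoopB]

-- B's block-comment state resolves to A's blockScan remainder.
theorem B_blockC (l : List Char) (a : Bool) :
    hasImportLoopB l JsState.blockC a = hasImportLoopB (blockScan l) JsState.normal a := by
  fun_induction blockScan l with
  | case1 p q r h =>
    obtain ⟨rfl, rfl⟩ := h
    rw [B_cons_blockC]
    simp
  | case2 p q r h ih =>
    rw [B_cons_blockC]
    rw [if_neg (show ¬(p = '*' ∧ (q :: r).head? = some '/') from by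
      rintro ⟨rfl, hh⟩
      simp only [List.head?_cons, Option.some.injEq] at hh
      exact h ⟨rfl, hh⟩)]
    exact ih
  | case3 l' h =>
    match l' with
    | [] => simp [hasImportLoopB]
    | [x] =>
      rw [B_cons_blockC]
      have hno : ¬(x = '*' ∧ ([] : List Char).head? = some '/') := by simp
      rw [if_neg hno, B_singleton]
      simp [hasImportLoopB]
    | x :: y :: r2 => exact absurd rfl (h x y r2)

theorem main_eq (l : List Char) (a : Bool) :
    hasImportLoopA l a = hasImportLoopB l JsState.normal a := by
  fun_induction hasImportLoopA l a with
  | case1 => simp [hasImportLoopB]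
  | case2 c rest at_start h1 ih =>
    -- string literal
    have hj : jsAdvance (c :: rest) = strScan c rest := by simp [jsAdvance, h1]
    rw [B_cons_normal, if_pos h1, ih, hj, B_instr]
  | case3 c rest at_start h1 h2 ih =>
    -- comment
    obtain ⟨hc, hd⟩ := h2
    subst hc
    rcases hd with hd | hd
    · -- line comment
      obtain ⟨r2, rfl⟩ : ∃ r2, rest = '/' :: r2 := by
        cases rest with
        | nil => simp at hd
        | cons y r2 => simp at hd; exact ⟨r2, by rw [hd]⟩
      have hj : jsAdvance ('/' :: '/' :: r2) = lineScan r2 := by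
        simp [jsAdvance, lineScan]
      rw [B_cons_normal, if_neg h1,
        if_pos (show ('/':Char) = '/' ∧ (('/' :: r2).head? = some '/') from ⟨rfl, by simp⟩)]
      rw [ih, hj, List.drop_one, List.tail_cons, B_lineC]
    · -- block comment
      obtain ⟨r2, rfl⟩ : ∃ r2, rest = '*' :: r2 := by
        cases rest with
        | nil => simp at hd
        | cons y r2 => simp at hd; exact ⟨r2, by rw [hd]⟩
      have hj : jsAdvance ('/' :: '*' :: r2) = blockScan r2 := by
        simp [jsAdvance]
      have hno : ¬(('/':Char) = '/' ∧ (('*' :: r2).head? = some '/')) := by simp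
      rw [B_cons_normal, if_neg h1, if_neg hno,
        if_pos (show ('/':Char) = '/' ∧ (('*' :: r2).head? = some '*') from ⟨rfl, by simp⟩)]
      rw [ih, hj, List.drop_one, List.tail_cons, B_blockC]
  | case4 c rest at_start h1 h2 h3 ih =>
    have h2' : ¬(c = '/' ∧ rest.head? = some '/') := fun ⟨ha, hb⟩ => h2 ⟨ha, Or.inl hb⟩
    have h2'' : ¬(c = '/' ∧ rest.head? = some '*') := fun ⟨ha, hb⟩ => h2 ⟨ha, Or.inr hb⟩
    rw [B_cons_normal, if_neg h1, if_neg h2', if_neg h2'', if_pos h3]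
    exact ih
  | case5 c rest at_start h1 h2 h3 h4 ih =>
    have h2' : ¬(c = '/' ∧ rest.head? = some '/') := fun ⟨ha, hb⟩ => h2 ⟨ha, Or.inl hb⟩
    have h2'' : ¬(c = '/' ∧ rest.head? = some '*') := fun ⟨ha, hb⟩ => h2 ⟨ha, Or.inr hb⟩
    rw [B_cons_normal, if_neg h1, if_neg h2', if_neg h2'', if_neg h3, if_pos h4]
    exact ih
  | case6 c rest at_start h1 h2 h3 h4 h5 =>
    have h2' : ¬(c = '/' ∧ rest.head? = some '/') := fun ⟨ha, hb⟩ => h2 ⟨ha, Or.inl hb⟩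
    have h2'' : ¬(c = '/' ∧ rest.head? = some '*') := fun ⟨ha, hb⟩ => h2 ⟨ha, Or.inr hb⟩
    rw [B_cons_normal, if_neg h1, if_neg h2', if_neg h2'', if_neg h3, if_neg h4, if_pos h5]
  | case7 c rest at_start h1 h2 h3 h4 h5 ih =>
    have h2' : ¬(c = '/' ∧ rest.head? = some '/') := fun ⟨ha, hb⟩ => h2 ⟨ha, Or.inl hb⟩
    have h2'' : ¬(c = '/' ∧ rest.head? = some '*') := fun ⟨ha, hb⟩ => h2 ⟨ha, Or.inr hb⟩
    rw [B_cons_normal, if_neg h1, if_neg h2', if_neg h2'', if_neg h3, if_neg h4, if_neg h5]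
    exact ih

-- ===== VERDICT (by name: the statement is the Claim_ definition above) =====
theorem has_import_py_spec : Claim_equal_has_import_py := by
  intro code _
  unfold Spec_has_import_py has_import_py has_import_py_alt
  exact main_eq _ _
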